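-- pv_equiv track=rewrite | github.com/soldamatlab/nucleotide-blast | lib/blast/automaton.py | find_best_substate
-- ===== SOURCE A (Python) =====
-- def find_best_substate(state, seeds, start_lb=0):
--     for start in range(start_lb, len(state)):
--         for seed in seeds:
--             for c in range(start, len(state)):
--                 if state[c] != seed[c-start]:
--                     break
--             else:
--                 return state[start:]
--     return ""
-- ===== SOURCE B (Python) =====
-- def find_best_substate(state, seeds, start_lb=0):
--     prefixes = set()
--     for seed in seeds:
--         for i in range(len(seed) + 1):
--             prefixes.add(seed[:i])
--     for start in range(max(start_lb, 0), len(state)):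
--         if state[start:] in prefixes:
--             return state[start:]
--     return ""
-- ===== Notes on version B (the rewrite author's own statement) =====
-- stated objective: faster
-- what changed: B builds a hash-set index of all prefixes of all seeds once, so the per-start inner scan over every seed disappears: each candidate suffix is tested by one set membership instead of character-matching against every seed.
-- outside the precondition, e.g. on find_best_substate('ab', ['ab', 'a'], 0): A returns 'ab', B returns 'ab'; on find_best_substate('ab', ['bab', 'abX'], -1): A returns 'b', B returns 'ab'
import Mathlib
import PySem

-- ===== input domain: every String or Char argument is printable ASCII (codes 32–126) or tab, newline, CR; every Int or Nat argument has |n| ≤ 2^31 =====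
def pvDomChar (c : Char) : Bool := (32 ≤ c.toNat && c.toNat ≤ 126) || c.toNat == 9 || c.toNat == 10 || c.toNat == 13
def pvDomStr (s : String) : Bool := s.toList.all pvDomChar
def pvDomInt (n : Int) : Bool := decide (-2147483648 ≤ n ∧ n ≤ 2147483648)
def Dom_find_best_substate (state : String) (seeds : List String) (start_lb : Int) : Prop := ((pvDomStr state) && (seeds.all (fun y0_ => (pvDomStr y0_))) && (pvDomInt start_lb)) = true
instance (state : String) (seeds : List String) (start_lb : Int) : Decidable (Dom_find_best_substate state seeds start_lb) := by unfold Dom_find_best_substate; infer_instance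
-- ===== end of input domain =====

-- B replaces A's per-start scan over every seed by one hash-set of all seed prefixes built once; return values only, no mutation.

-- ===== PORT A =====
-- inner 'for c in range(start, len(state)): if state[c] != seed[c-start]: break / else: return'
-- (an out-of-range index is a Python IndexError; such inputs are outside Pre_, the branch returns false there)
def fbsInner (st sd : List Char) (start : Int) : List Int → Bool
  | [] => true
  | c :: rest =>
    match PySem.List.pyGet? st c, PySem.List.pyGet? sd (c - start) with
    | some a, some b => if a ≠ b then false else fbsInner st sd start rest
    | _, _ => false

-- 'for seed in seeds: … else-of-inner-loop: return state[start:]'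
def fbsSeedLoop (st : List Char) (start : Int) : List (List Char) → Option (List Char)
  | [] => none
  | sd :: rest =>
    if fbsInner st sd start (PySem.List.pyRange start (st.length : Int) 1) then
      some (PySem.List.slice st (some start) none)
    else fbsSeedLoop st start rest

-- 'for start in range(start_lb, len(state)): …' then 'return ""'
def fbsOuter (st : List Char) (seeds : List (List Char)) : List Int → List Char
  | [] => []
  | s :: rest =>
    match fbsSeedLoop st s seeds with
    | some r => r
    | none => fbsOuter st seeds rest

def find_best_substate (state : String) (seeds : List String) (start_lb : Int) : String :=
  String.ofList (fbsOuter state.toList (seeds.map (·.toList))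
    (PySem.List.pyRange start_lb (state.toList.length : Int) 1))

-- ===== PORT B =====
-- 'for i in range(len(seed) + 1): prefixes.add(seed[:i])'
def fbsAddPrefixes (p : PySem.Set (List Char)) (sd : List Char) : PySem.Set (List Char) :=
  (PySem.List.pyRange 0 ((sd.length : Int) + 1) 1).foldl
    (fun s i => PySem.Set.add s (PySem.List.slice sd none (some i))) p

-- 'for start in range(max(start_lb, 0), len(state)): if state[start:] in prefixes: return state[start:]'
def fbsScan (st : List Char) (p : PySem.Set (List Char)) : List Int → List Char
  | [] => []
  | s :: rest =>
    if PySem.Set.contains p (PySem.List.slice st (some s) none) then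
      PySem.List.slice st (some s) none
    else fbsScan st p rest

def find_best_substate_alt (state : String) (seeds : List String) (start_lb : Int) : String :=
  let prefixes := (seeds.map (·.toList)).foldl fbsAddPrefixes PySem.Set.empty
  String.ofList (fbsScan state.toList prefixes
    (PySem.List.pyRange (max start_lb 0) (state.toList.length : Int) 1))

-- ===== PRECONDITION & SPEC =====
-- Pre_ excludes (a) negative start_lb with nonempty seeds, where A reads state with Python's
-- negative-index wraparound (and raises IndexError when start_lb < -len(state)), and (b) inputs
-- where some seed is a proper prefix of a scanned suffix of state, where A's inner loop runs off
-- the end of the seed (IndexError) unless an earlier seed already returned.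
def Pre_find_best_substate (state : String) (seeds : List String) (start_lb : Int) : Prop :=
  (0 ≤ start_lb ∨ seeds = []) ∧
  ∀ s ∈ PySem.List.pyRange start_lb (state.toList.length : Int) 1,
    ∀ sd ∈ seeds,
      ¬ (sd.toList <+: state.toList.drop s.toNat ∧
         sd.toList.length < state.toList.length - s.toNat)
instance (state : String) (seeds : List String) (start_lb : Int) :
    Decidable (Pre_find_best_substate state seeds start_lb) := by
  unfold Pre_find_best_substate; infer_instance

def pvWitness_find_best_substate : String × List String × Int := ("ab", ["abc"], 0)

def Spec_find_best_substate (state : String) (seeds : List String) (start_lb : Int) (out : String) : Prop := out = find_best_substate_alt state seeds start_lb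
instance (state : String) (seeds : List String) (start_lb : Int) (out : String) : Decidable (Spec_find_best_substate state seeds start_lb out) := by unfold Spec_find_best_substate; infer_instance

-- ===== CLAIM (what is proved, stated in full; the proofs are below) =====
def Claim_equal_find_best_substate : Prop := ∀ (state : String) (seeds : List String) (start_lb : Int), Dom_find_best_substate state seeds start_lb → Pre_find_best_substate state seeds start_lb → Spec_find_best_substate state seeds start_lb (find_best_substate state seeds start_lb)

-- ===== LEMMAS AND PROOFS =====

-- A's inner character loop decides "the suffix of state at c is a prefix of the suffix of seed at c-start".
theorem fbsInner_eq (st sd : List Char) (start : Int) (h0 : 0 ≤ start) :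
    ∀ (c : Int), start ≤ c →
      fbsInner st sd start (PySem.List.pyRange c (st.length : Int) 1) =
        decide (st.drop c.toNat <+: sd.drop (c - start).toNat) := by
  have key : ∀ (m : Nat) (c : Int), start ≤ c → ((st.length : Int) - c).toNat ≤ m →
      fbsInner st sd start (PySem.List.pyRange c (st.length : Int) 1) =
        decide (st.drop c.toNat <+: sd.drop (c - start).toNat) := by
    intro m
    induction m with
    | zero =>
      intro c hc hm
      rw [PySem.List.pyRange_one_eq_nil (by omega)]
      have hdrop : st.drop c.toNat = [] := List.drop_eq_nil_of_le (by omega)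
      simp [fbsInner, hdrop]
    | succ m ih =>
      intro c hc hm
      by_cases hlt : c < (st.length : Int)
      · rw [PySem.List.pyRange_one_cons hlt]
        have hc0 : 0 ≤ c := le_trans h0 hc
        have hcs : 0 ≤ c - start := by omega
        have hcn : c.toNat < st.length := by omega
        have hdropst : st.drop c.toNat = st[c.toNat] :: st.drop (c.toNat + 1) :=
          List.drop_eq_getElem_cons hcn
        simp only [fbsInner]
        rw [PySem.List.pyGet?_of_nonneg st hc0, PySem.List.pyGet?_of_nonneg sd hcs,
            List.getElem?_eq_getElem hcn]
        by_cases hsd : (c - start).toNat < sd.length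
        · rw [List.getElem?_eq_getElem hsd]
          have hdropsd : sd.drop (c - start).toNat =
              sd[(c - start).toNat] :: sd.drop ((c - start).toNat + 1) :=
            List.drop_eq_getElem_cons hsd
          have hiff : (st.drop c.toNat <+: sd.drop (c - start).toNat) ↔
              (st[c.toNat] = sd[(c - start).toNat] ∧
                st.drop (c.toNat + 1) <+: sd.drop ((c - start).toNat + 1)) := by
            rw [hdropst, hdropsd, List.cons_prefix_cons]
          show (if st[c.toNat] ≠ sd[(c - start).toNat] then false
              else fbsInner st sd start (PySem.List.pyRange (c + 1) (st.length : Int) 1)) = _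
          have h1 : (c + 1).toNat = c.toNat + 1 := by omega
          have h2 : (c + 1 - start).toNat = (c - start).toNat + 1 := by omega
          have hrec := ih (c + 1) (by omega) (by omega)
          rw [h1, h2] at hrec
          by_cases heq : st[c.toNat] = sd[(c - start).toNat]
          · rw [if_neg (not_not_intro heq), hrec]
            apply decide_eq_decide.mpr
            rw [hiff]
            simp [heq]
          · rw [if_pos heq]
            symm
            simp only [decide_eq_false_iff_not]
            rw [hiff]
            exact fun h => heq h.1
        · rw [List.getElem?_eq_none (by omega)]
          have hdropsd : sd.drop (c - start).toNat = [] := List.drop_eq_nil_of_le (by omega)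
          show false = _
          symm
          simp only [decide_eq_false_iff_not]
          rw [hdropst, hdropsd]
          simp
          exact hcn
      · rw [PySem.List.pyRange_one_eq_nil (by omega)]
        have hdrop : st.drop c.toNat = [] := List.drop_eq_nil_of_le (by omega)
        simp [fbsInner, hdrop]
  intro c hc
  exact key ((st.length : Int) - c).toNat c hc le_rfl

-- A's seed loop at a nonnegative start returns the suffix iff some seed has it as a prefix.
theorem fbsSeedLoop_eq (st : List Char) (s : Int) (hs : 0 ≤ s) (sds : List (List Char)) :
    fbsSeedLoop st s sds =
      if sds.any (fun sd => decide (st.drop s.toNat <+: sd)) then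
        some (st.drop s.toNat)
      else none := by
  induction sds with
  | nil => simp [fbsSeedLoop]
  | cons sd rest ih =>
    have hinner := fbsInner_eq st sd s hs s le_rfl
    have hz : (s - s).toNat = 0 := by omega
    rw [hz, List.drop_zero] at hinner
    simp only [fbsSeedLoop, hinner, PySem.List.slice_from st hs]
    by_cases hp : st.drop s.toNat <+: sd
    · simp [hp]
    · simp [hp, ih]

-- B's index step adds exactly the prefixes of one seed.
theorem mem_fbsAddPrefixes (p : PySem.Set (List Char)) (sd x : List Char) :
    x ∈ fbsAddPrefixes p sd ↔ x ∈ p ∨ x <+: sd := by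
  unfold fbsAddPrefixes
  rw [PySem.Set.mem_foldl_add]
  constructor
  · rintro (h | ⟨i, hi, rfl⟩)
    · exact Or.inl h
    · rw [PySem.List.mem_pyRange_one] at hi
      rw [PySem.List.slice_to sd hi.1]
      exact Or.inr (List.take_prefix _ _)
  · rintro (h | hpre)
    · exact Or.inl h
    · refine Or.inr ⟨(x.length : Int), ?_, ?_⟩
      · rw [PySem.List.mem_pyRange_one]
        have := hpre.length_le
        omega
      · rw [PySem.List.slice_to sd (by omega)]
        rw [Int.toNat_natCast]
        exact (List.prefix_iff_eq_take.mp hpre)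

-- B's index contains exactly the prefixes of the seeds.
theorem mem_prefixSet_aux (sds : List (List Char)) :
    ∀ (p : PySem.Set (List Char)) (x : List Char),
      x ∈ sds.foldl fbsAddPrefixes p ↔ x ∈ p ∨ ∃ sd ∈ sds, x <+: sd := by
  induction sds with
  | nil => intro p x; simp
  | cons sd rest ih =>
    intro p x
    simp only [List.foldl_cons, ih, mem_fbsAddPrefixes, List.exists_mem_cons_iff]
    tauto

theorem mem_prefixSet (sds : List (List Char)) (x : List Char) :
    x ∈ sds.foldl fbsAddPrefixes PySem.Set.empty ↔ ∃ sd ∈ sds, x <+: sd := by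
  rw [mem_prefixSet_aux]
  simp [PySem.Set.empty]

-- the two outer loops agree on any list of nonnegative starts, for any index set
-- containing exactly the prefixes of the seeds
theorem fbsOuter_eq_fbsScan (st : List Char) (sds : List (List Char)) (p : PySem.Set (List Char))
    (hp : ∀ x, x ∈ p ↔ ∃ sd ∈ sds, x <+: sd) :
    ∀ (L : List Int), (∀ s ∈ L, 0 ≤ s) → fbsOuter st sds L = fbsScan st p L := by
  intro L
  induction L with
  | nil => intro _; rfl
  | cons s rest ih =>
    intro hL
    have hs : 0 ≤ s := hL s (by simp)
    have hrest : ∀ t ∈ rest, 0 ≤ t := fun t ht => hL t (by simp [ht])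
    simp only [fbsOuter, fbsScan, fbsSeedLoop_eq st s hs, PySem.List.slice_from st hs]
    by_cases hmem : st.drop s.toNat ∈ p
    · have hex : ∃ sd ∈ sds, st.drop s.toNat <+: sd := (hp _).mp hmem
      have hany : sds.any (fun sd => decide (st.drop s.toNat <+: sd)) = true := by
        simpa [List.any_eq_true] using hex
      simp [hany, hmem]
    · have hex : ¬ ∃ sd ∈ sds, st.drop s.toNat <+: sd := fun h => hmem ((hp _).mpr h)
      have hany : sds.any (fun sd => decide (st.drop s.toNat <+: sd)) = false := by
        simp only [List.any_eq_false]
        intro sd hsd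
        simp only [decide_eq_true_eq]
        exact fun hpre => hex ⟨sd, hsd, hpre⟩
      simp [hany, hmem, ih hrest]

theorem fbsOuter_nil_seeds (st : List Char) : ∀ (L : List Int), fbsOuter st [] L = [] := by
  intro L
  induction L with
  | nil => rfl
  | cons s rest ih => simp [fbsOuter, fbsSeedLoop, ih]

theorem fbsScan_nil_set (st : List Char) : ∀ (L : List Int), fbsScan st PySem.Set.empty L = [] := by
  intro L
  induction L with
  | nil => rfl
  | cons s rest ih =>
    simp [fbsScan, PySem.Set.contains, PySem.Set.empty]
    exact ih

-- ===== VERDICT (by name: the statement is the Claim_ definition above) =====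
theorem find_best_substate_spec : Claim_equal_find_best_substate := by
  intro state seeds start_lb _hdom hpre
  unfold Spec_find_best_substate find_best_substate find_best_substate_alt
  rcases hpre with ⟨h1 | h1, _h2⟩
  · have hmax : max start_lb 0 = start_lb := by omega
    rw [hmax]
    have := fbsOuter_eq_fbsScan state.toList (seeds.map (·.toList)) _
      (mem_prefixSet (seeds.map (·.toList)))
      (PySem.List.pyRange start_lb (state.toList.length : Int) 1)
      (by intro s hsmem; have := PySem.List.mem_pyRange_one.mp hsmem; omega)
    simp only [this]
  · subst h1
    simp only [List.map_nil, List.foldl_nil]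
    rw [fbsOuter_nil_seeds, fbsScan_nil_set]
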